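-- pv_equiv track=rewrite | github.com/MrBrantCode/unitest_baseline | mut_generate/mist_train_cf/cf_3276/solution.py | find_prime_info
-- ===== SOURCE A (Python) =====
-- import math
--
-- def find_prime_info(num):
--     if num < 2:
--         return (False, [], [])
--
--     def is_prime(n):
--         if n < 2:
--             return False
--         for i in range(2, int(math.sqrt(n)) + 1):
--             if n % i == 0:
--                 return False
--         return True
--
--     def find_next_primes(n, count):
--         primes = []
--         while len(primes) < count:
--             n += 1
--             if is_prime(n):
--                 primes.append(n)
--         return primes
--
--     def find_prime_factors(n):
--         factors = []
--         while n % 2 == 0: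
--             factors.append(2)
--             n = n // 2
--         for i in range(3, int(math.sqrt(n)) + 1, 2):
--             while n % i == 0:
--                 factors.append(i)
--                 n = n // i
--         if n > 2:
--             factors.append(n)
--         return factors
--
--     if is_prime(num):
--         return (True, [], [])
--     else:
--         next_primes = find_next_primes(num, 2)
--         prime_factors = find_prime_factors(num)
--         return (False, next_primes, prime_factors)
-- ===== SOURCE B (Python) =====
-- def find_prime_info(num):
--     if num < 2:
--         return (False, [], [])
--
--     def spf(n):
--         i = 2
--         while i * i <= n:
--             if n % i == 0:
--                 return i
--             i += 1
--         return n
--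
--     def is_prime(n):
--         return n >= 2 and spf(n) == n
--
--     def next_prime(n):
--         n += 1
--         while not is_prime(n):
--             n += 1
--         return n
--
--     if is_prime(num):
--         return (True, [], [])
--
--     p1 = next_prime(num)
--     p2 = next_prime(p1)
--
--     factors = []
--     n = num
--     while n > 1:
--         f = spf(n)
--         factors.append(f)
--         n //= f
--
--     return (False, [p1, p2], factors)
-- ===== Notes on version B (the rewrite author's own statement) =====
-- stated objective: alternative
-- what changed: B replaces A's three independent trial-division loops (a standalone is_prime, a count-driven next-primes accumulator loop, and a two-phase factorizer that strips 2s then scans odd candidates to a precomputed sqrt bound) by a single smallest-prime-factor primitive: primality is spf(n)==n, the next two primes are two calls of a next_prime helper, and factorization repeatedly appends spf(n) and divides it out.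
import Mathlib
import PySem

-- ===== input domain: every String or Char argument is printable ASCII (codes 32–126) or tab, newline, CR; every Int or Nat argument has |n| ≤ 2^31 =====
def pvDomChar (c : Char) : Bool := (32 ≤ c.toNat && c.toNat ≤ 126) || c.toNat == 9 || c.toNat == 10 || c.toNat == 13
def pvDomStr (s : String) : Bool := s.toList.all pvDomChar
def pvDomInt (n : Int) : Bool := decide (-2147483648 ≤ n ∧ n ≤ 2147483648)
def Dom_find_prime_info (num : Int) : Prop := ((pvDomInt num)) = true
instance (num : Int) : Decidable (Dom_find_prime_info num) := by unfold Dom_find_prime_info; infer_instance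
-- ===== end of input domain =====

-- B replaces A's three ad-hoc loops by one smallest-prime-factor primitive: primality = spf(n)==n,
-- factorization = repeatedly divide by spf (no separate 2-phase/odd-phase), next primes = two next_prime calls.

-- ===== PORT A =====
-- int(math.sqrt(n)) is ported as Int.sqrt: exact for the 0 ≤ n ≤ 2^31 + small values this program feeds it
def isPrimeA (n : Int) : Bool :=
  if n < 2 then false
  else (PySem.List.pyRange 2 (Int.sqrt n + 1) 1).all (fun i => !(PySem.Int.mod n i == 0))

-- while len(primes) < count: n += 1; if is_prime(n): primes.append(n)   (fuel only totalises the while loop)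
def nextPrimesA : Nat → Int → Nat → List Int → List Int
  | 0, _, _, primes => primes
  | fuel+1, n, count, primes =>
    if primes.length < count then
      if isPrimeA (n+1) then nextPrimesA fuel (n+1) count (primes ++ [n+1])
      else nextPrimesA fuel (n+1) count primes
    else primes

-- while n % i == 0: factors.append(i); n = n // i   (fuel only totalises the while loop)
def divOutA : Nat → Int → Int → List Int → Int × List Int
  | 0, _, n, acc => (n, acc)
  | fuel+1, i, n, acc =>
    if PySem.Int.mod n i == 0 then divOutA fuel i (PySem.Int.floordiv n i) (acc ++ [i])
    else (n, acc)

def factorsA (n : Int) : List Int :=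
  let s1 := divOutA (n.toNat + 1) 2 n []
  let s2 := (PySem.List.pyRange 3 (Int.sqrt s1.1 + 1) 2).foldl
      (fun (st : Int × List Int) i => divOutA (st.1.toNat + 1) i st.1 st.2) s1
  if s2.1 > 2 then s2.2 ++ [s2.1] else s2.2

def find_prime_info (num : Int) : Bool × List Int × List Int :=
  if num < 2 then (false, [], [])
  else if isPrimeA num then (true, [], [])
  else (false, nextPrimesA (4 * num.toNat + 64) num 2 [], factorsA num)

-- ===== PORT B =====
-- i = 2; while i*i <= n: if n % i == 0: return i; i += 1; return n   (fuel only totalises the while loop)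
def spfAux : Nat → Int → Int → Int
  | 0, _, n => n
  | fuel+1, i, n =>
    if i * i ≤ n then (if PySem.Int.mod n i == 0 then i else spfAux fuel (i+1) n) else n

def spfB (n : Int) : Int := spfAux (n.toNat + 2) 2 n

def isPrimeB (n : Int) : Bool := 2 ≤ n && spfB n == n

-- n += 1; while not is_prime(n): n += 1; return n   (fuel only totalises the while loop)
def nextPrimeBAux : Nat → Int → Int
  | 0, n => n
  | fuel+1, n => if isPrimeB n then n else nextPrimeBAux fuel (n+1)

def nextPrimeB (n : Int) : Int := nextPrimeBAux (2 * n.toNat + 64) (n + 1)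

-- while n > 1: f = spf(n); factors.append(f); n //= f   (fuel only totalises the while loop)
def factBAux : Nat → Int → List Int → List Int
  | 0, _, acc => acc
  | fuel+1, n, acc =>
    if 1 < n then factBAux fuel (PySem.Int.floordiv n (spfB n)) (acc ++ [spfB n]) else acc

def find_prime_info_alt (num : Int) : Bool × List Int × List Int :=
  if num < 2 then (false, [], [])
  else if isPrimeB num then (true, [], [])
  else
    let p1 := nextPrimeB num
    let p2 := nextPrimeB p1
    (false, [p1, p2], factBAux (num.toNat + 1) num [])

-- ===== PRECONDITION & SPEC =====
def Spec_find_prime_info (num : Int) (out : Bool × List Int × List Int) : Prop := out = find_prime_info_alt num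
instance (num : Int) (out : Bool × List Int × List Int) : Decidable (Spec_find_prime_info num out) := by unfold Spec_find_prime_info; infer_instance

-- ===== CLAIM (what is proved, stated in full; the proofs are below) =====
def Claim_equal_find_prime_info : Prop := ∀ (num : Int), Dom_find_prime_info num → Spec_find_prime_info num (find_prime_info num)

-- ===== LEMMAS AND PROOFS =====

/-- the mathematical primality predicate both programs' `is_prime` compute -/
def PP (n : Int) : Prop := 2 ≤ n ∧ Nat.Prime n.toNat

/-- `q` is the least prime strictly above `n` -/
def LP (n q : Int) : Prop := n < q ∧ PP q ∧ ∀ m : Int, n < m → m < q → ¬ PP m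

lemma dvd_toNat {i n : Int} (hi : 0 ≤ i) (hn : 0 ≤ n) : i ∣ n ↔ i.toNat ∣ n.toNat := by
  rw [← Int.natCast_dvd_natCast, Int.toNat_of_nonneg hi, Int.toNat_of_nonneg hn]

lemma PP_no_small_div {n j : Int} (h : PP n) (h2 : 2 ≤ j) (hj : j * j ≤ n) : ¬ j ∣ n := by
  obtain ⟨hn, hp⟩ := h
  intro hd
  have hj' : j.toNat ∣ n.toNat := (dvd_toNat (by omega) (by omega)).1 hd
  rcases hp.eq_one_or_self_of_dvd _ hj' with h1 | h1
  · omega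
  · have hjn : j = n := by omega
    nlinarith

lemma prime_of_no_div {n : Int} (hn : 2 ≤ n) (h : ∀ j : Int, 2 ≤ j → j * j ≤ n → ¬ j ∣ n) :
    PP n := by
  refine ⟨hn, Nat.prime_def_le_sqrt.2 ⟨by omega, fun m hm hms hd => ?_⟩⟩
  have h1 : (m : Int) * m ≤ n := by
    have h2 := Nat.le_sqrt.1 hms
    have h3 : ((m * m : Nat) : Int) ≤ ((n.toNat : Nat) : Int) := by exact_mod_cast h2
    push_cast at h3
    omega
  have h4 : (m : Int) ∣ n := by
    rw [dvd_toNat (by positivity) (by omega)]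
    simpa using hd
  exact h (m : Int) (by exact_mod_cast hm) h1 h4

lemma minFac_int {n i : Int} (hn : 1 ≤ n) (hi : 2 ≤ i) (hd : i ∣ n)
    (hmin : ∀ j : Int, 2 ≤ j → j < i → ¬ j ∣ n) : i = (n.toNat.minFac : Int) := by
  have hin : i ≤ n := Int.le_of_dvd (by omega) hd
  have h1 : i.toNat ∣ n.toNat := (dvd_toNat (by omega) (by omega)).1 hd
  have hub : n.toNat.minFac ≤ i.toNat := Nat.minFac_le_of_dvd (by omega) h1
  have hdvd : (n.toNat.minFac : Int) ∣ n := by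
    rw [dvd_toNat (by positivity) (by omega)]
    simpa using Nat.minFac_dvd n.toNat
  have h2 : 2 ≤ n.toNat.minFac := (Nat.minFac_prime (by omega)).two_le
  by_contra hne2
  exact hmin _ (by exact_mod_cast h2) (by omega) hdvd

lemma isPrimeA_iff (n : Int) : isPrimeA n = true ↔ PP n := by
  unfold isPrimeA
  by_cases hlt : n < 2
  · simp only [hlt, if_true, Bool.false_eq_true, false_iff]
    intro h
    exact absurd h.1 (by omega)
  · simp only [hlt, if_false, List.all_eq_true]
    constructor
    · intro h
      refine prime_of_no_div (by omega) (fun j h2 hjj hd => ?_)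
      have hc : (j.toNat : Int) = j := by omega
      have hsq : j.toNat ≤ Nat.sqrt n.toNat := by
        refine Nat.le_sqrt.2 ?_
        have : ((j.toNat * j.toNat : Nat) : Int) ≤ ((n.toNat : Nat) : Int) := by
          push_cast
          rw [hc, Int.toNat_of_nonneg (by omega)]
          exact hjj
        exact_mod_cast this
      have hmem : j ∈ PySem.List.pyRange 2 (Int.sqrt n + 1) 1 := by
        rw [PySem.List.mem_pyRange_iff_of_pos one_pos]
        refine ⟨h2, ?_, one_dvd _⟩
        simp only [Int.sqrt]
        omega
      have h5 := h j hmem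
      simp only [Bool.not_eq_eq_eq_not, Bool.not_true, beq_eq_false_iff_ne, ne_eq,
        PySem.Int.mod_eq_zero_iff_dvd] at h5
      exact h5 hd
    · intro hp j hmem
      rw [PySem.List.mem_pyRange_iff_of_pos one_pos] at hmem
      obtain ⟨h2, hlt2, -⟩ := hmem
      have hsq : j.toNat ≤ Nat.sqrt n.toNat := by
        simp only [Int.sqrt] at hlt2
        omega
      have hjj : j * j ≤ n := by
        have h4 := Nat.le_sqrt.1 hsq
        have : ((j.toNat * j.toNat : Nat) : Int) ≤ ((n.toNat : Nat) : Int) := by exact_mod_cast h4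
        push_cast at this
        have hc : (j.toNat : Int) = j := by omega
        rw [hc] at this
        omega
      have := PP_no_small_div hp h2 hjj
      simp only [Bool.not_eq_eq_eq_not, Bool.not_true, beq_eq_false_iff_ne, ne_eq,
        PySem.Int.mod_eq_zero_iff_dvd]
      exact this

lemma spfAux_eq {n : Int} (hn : 2 ≤ n) :
    ∀ (fuel : Nat) (i : Int), 2 ≤ i → i ≤ n → n + 2 ≤ (fuel : Int) + i →
    (∀ j : Int, 2 ≤ j → j < i → ¬ j ∣ n) → spfAux fuel i n = (n.toNat.minFac : Int)
  | 0, i, h2, hin, hf, hmin => by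
    exfalso
    simp only [Nat.cast_zero] at hf
    omega
  | fuel+1, i, h2, hin, hf, hmin => by
    unfold spfAux
    by_cases hii : i * i ≤ n
    · simp only [hii, if_true]
      by_cases hd : i ∣ n
      · have hc : (PySem.Int.mod n i == 0) = true := by
          simp [PySem.Int.mod_eq_zero_iff_dvd, hd]
        simp only [hc, if_true]
        exact minFac_int (by omega) h2 hd hmin
      · have hc : (PySem.Int.mod n i == 0) = false := by
          simp [PySem.Int.mod_eq_zero_iff_dvd, hd]
        simp only [hc, Bool.false_eq_true, if_false]
        refine spfAux_eq hn fuel (i+1) (by omega) (by nlinarith) ?_ ?_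
        · push_cast at hf ⊢
          omega
        · intro j hj hji
          rcases lt_or_eq_of_le (show j ≤ i by omega) with h | h
          · exact hmin j hj h
          · rw [h]; exact hd
    · simp only [hii, if_false]
      have hp : PP n := by
        refine prime_of_no_div hn (fun j hj hjj hd => ?_)
        rcases lt_or_ge j i with h | h
        · exact hmin j hj h hd
        · nlinarith
      have := hp.2.minFac_eq
      omega

lemma spfB_eq {n : Int} (hn : 2 ≤ n) : spfB n = (n.toNat.minFac : Int) := by
  refine spfAux_eq hn (n.toNat + 2) 2 (le_refl 2) hn ?_ (fun j hj hji => absurd hji (by omega))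
  push_cast
  omega

lemma isPrimeB_iff (n : Int) : isPrimeB n = true ↔ PP n := by
  unfold isPrimeB
  by_cases h2 : 2 ≤ n
  · rw [spfB_eq h2]
    simp only [h2, decide_true, Bool.true_and, beq_iff_eq]
    constructor
    · intro h
      exact ⟨h2, Nat.prime_def_minFac.2 ⟨by omega, by omega⟩⟩
    · intro hp
      have := hp.2.minFac_eq
      omega
  · simp only [h2, decide_false, Bool.false_and, Bool.false_eq_true, false_iff]
    intro h
    exact h2 h.1

lemma exists_least_prime {n : Int} (hn : 1 ≤ n) : ∃ q, q ≤ 2 * n ∧ LP n q := by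
  obtain ⟨p, pp, hlt, hle⟩ := Nat.exists_prime_lt_and_le_two_mul n.toNat (by omega)
  have hex : ∃ k : Nat, Nat.Prime k ∧ n < (k : Int) := ⟨p, pp, by omega⟩
  obtain ⟨hq1, hq2⟩ := Nat.find_spec hex
  have hfind : Nat.find hex ≤ p := Nat.find_min' hex ⟨pp, by omega⟩
  refine ⟨(Nat.find hex : Int), by omega, hq2, ⟨by have := hq1.two_le; omega, by simpa using hq1⟩,
    fun m h1 h2 hpp => ?_⟩
  have hm : Nat.Prime m.toNat ∧ n < (m.toNat : Int) := ⟨hpp.2, by omega⟩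
  exact Nat.find_min hex (by omega) hm

lemma nextPrimeBAux_eq : ∀ (fuel : Nat) (a q : Int), a ≤ q → PP q →
    (∀ m : Int, a ≤ m → m < q → ¬ PP m) → (q - a).toNat ≤ fuel →
    nextPrimeBAux fuel a = q
  | 0, a, q, hle, hq, hmin, hf => by
    have : a = q := by omega
    rw [this, nextPrimeBAux]
  | fuel+1, a, q, hle, hq, hmin, hf => by
    unfold nextPrimeBAux
    by_cases hpa : PP a
    · have haq : a = q := by
        by_contra hne
        exact hmin a (le_refl a) (by omega) hpa
      subst haq
      simp [(isPrimeB_iff a).2 hpa]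
    · have hb : isPrimeB a = false := by
        rw [← Bool.not_eq_true, isPrimeB_iff]
        exact hpa
      have hne : a ≠ q := fun h => hpa (h ▸ hq)
      simp only [hb, Bool.false_eq_true, if_false]
      exact nextPrimeBAux_eq fuel (a+1) q (by omega) hq
        (fun m h1 h2 => hmin m (by omega) h2) (by omega)

lemma nextPrimeB_eq {n q : Int} (hn : 1 ≤ n) (hlp : LP n q) (hb : q ≤ 2 * n) :
    nextPrimeB n = q := by
  obtain ⟨h1, h2, h3⟩ := hlp
  exact nextPrimeBAux_eq _ (n+1) q (by omega) h2 (fun m hm1 hm2 => h3 m (by omega) hm2) (by omega)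

lemma nextPrimesA_skip : ∀ (fuel : Nat) (n q : Int) (c : Nat) (acc : List Int),
    acc.length < c → LP n q → (q - n).toNat ≤ fuel →
    nextPrimesA fuel n c acc = nextPrimesA (fuel - (q - n).toNat) q c (acc ++ [q])
  | 0, n, q, c, acc, hlen, hlp, hf => by
    exfalso
    obtain ⟨h1, -, -⟩ := hlp
    omega
  | fuel+1, n, q, c, acc, hlen, hlp, hf => by
    obtain ⟨hlt, hq, hmin⟩ := hlp
    conv_lhs => rw [nextPrimesA]
    simp only [hlen, if_true]
    by_cases h : n + 1 = q
    · have hpa : isPrimeA (n+1) = true := (isPrimeA_iff _).2 (h ▸ hq)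
      rw [h] at hpa
      simp only [h, hpa, if_true]
      have : fuel + 1 - (q - n).toNat = fuel := by omega
      rw [this]
    · have hpa : isPrimeA (n+1) = false := by
        rw [← Bool.not_eq_true, isPrimeA_iff]
        exact hmin (n+1) (by omega) (by omega)
      simp only [hpa, Bool.false_eq_true, if_false]
      rw [nextPrimesA_skip fuel (n+1) q c acc hlen
        ⟨by omega, hq, fun m h1 h2 => hmin m (by omega) h2⟩ (by omega)]
      congr 1
      omega

lemma nextPrimesA_done (fuel : Nat) (n : Int) (c : Nat) (acc : List Int)
    (h : c ≤ acc.length) : nextPrimesA fuel n c acc = acc := by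
  cases fuel with
  | zero => rw [nextPrimesA]
  | succ fuel =>
    rw [nextPrimesA]
    simp only [Nat.not_lt.2 h, if_false]

lemma nextPrimesA_two {num q1 q2 : Int} (h1 : 1 ≤ num) (l1 : LP num q1) (l2 : LP q1 q2)
    (b1 : q1 ≤ 2 * num) (b2 : q2 ≤ 2 * q1) :
    nextPrimesA (4 * num.toNat + 64) num 2 [] = [q1, q2] := by
  have hq1 : num < q1 := l1.1
  have hq2 : q1 < q2 := l2.1
  rw [nextPrimesA_skip _ num q1 2 [] (by simp) l1 (by omega)]
  simp only [List.nil_append]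
  rw [nextPrimesA_skip _ q1 q2 2 [q1] (by simp) l2 (by omega)]
  exact nextPrimesA_done _ q2 2 [q1, q2] (by simp)

lemma pfl_cons {m : Nat} (hm : 2 ≤ m) :
    m.primeFactorsList = m.minFac :: (m / m.minFac).primeFactorsList := by
  obtain ⟨k, rfl⟩ : ∃ k, m = k + 2 := ⟨m - 2, by omega⟩
  exact Nat.primeFactorsList_add_two k

lemma factBAux_eq : ∀ (fuel : Nat) (n : Int) (acc : List Int), 1 ≤ n → n.toNat ≤ fuel →
    factBAux fuel n acc = acc ++ (n.toNat.primeFactorsList).map (fun k : Nat => (k : Int))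
  | 0, n, acc, h1, hf => by
    exfalso
    omega
  | fuel+1, n, acc, h1, hf => by
    unfold factBAux
    by_cases hgt : 1 < n
    · simp only [hgt, if_true]
      have h2 : 2 ≤ n := by omega
      have hm2 : 2 ≤ n.toNat := by omega
      have hmf2 : 2 ≤ n.toNat.minFac := (Nat.minFac_prime (by omega)).two_le
      rw [spfB_eq h2]
      have hfd : PySem.Int.floordiv n (n.toNat.minFac : Int) = ((n.toNat / n.toNat.minFac : Nat) : Int) := by
        rw [← Int.toNat_of_nonneg (show (0:Int) ≤ n by omega)]
        exact PySem.Int.floordiv_natCast _ _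
      have hdivpos : 1 ≤ n.toNat / n.toNat.minFac := Nat.div_pos (Nat.minFac_le (by omega)) (Nat.minFac_pos _)
      have hdivlt : n.toNat / n.toNat.minFac < n.toNat := Nat.div_lt_self (by omega) (by omega)
      rw [hfd, factBAux_eq fuel _ _ (by exact_mod_cast hdivpos) (by omega)]
      rw [Int.toNat_natCast, pfl_cons hm2]
      simp
    · simp only [hgt, if_false]
      have : n.toNat = 1 := by omega
      simp [this]

lemma divOutA_spec : ∀ (fuel : Nat) (i n : Int) (acc : List Int), 2 ≤ i → 1 ≤ n →
    (∀ j : Int, 2 ≤ j → j < i → ¬ j ∣ n) → n.toNat ≤ fuel →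
    ∃ n' fs, divOutA fuel i n acc = (n', acc ++ fs) ∧ 1 ≤ n' ∧ n' ≤ n ∧ ¬ i ∣ n' ∧
      (∀ j : Int, 2 ≤ j → j < i → ¬ j ∣ n') ∧
      (n.toNat.primeFactorsList).map (fun k : Nat => (k : Int)) =
        fs ++ (n'.toNat.primeFactorsList).map (fun k : Nat => (k : Int))
  | 0, i, n, acc, hi, hn, hmin, hf => by exfalso; omega
  | fuel+1, i, n, acc, hi, hn, hmin, hf => by
    unfold divOutA
    by_cases hd : i ∣ n
    · have hc : (PySem.Int.mod n i == 0) = true := by simp [PySem.Int.mod_eq_zero_iff_dvd, hd]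
      simp only [hc, if_true]
      have hni : i ≤ n := Int.le_of_dvd (by omega) hd
      have hmf : i = (n.toNat.minFac : Int) := minFac_int hn hi hd hmin
      have hfd : PySem.Int.floordiv n i = ((n.toNat / n.toNat.minFac : Nat) : Int) := by
        rw [hmf, ← Int.toNat_of_nonneg (show (0:Int) ≤ n by omega)]
        exact PySem.Int.floordiv_natCast _ _
      have hdivpos : 1 ≤ n.toNat / n.toNat.minFac :=
        Nat.div_pos (Nat.minFac_le (by omega)) (Nat.minFac_pos _)
      have hdivlt : n.toNat / n.toNat.minFac < n.toNat := Nat.div_lt_self (by omega) (by omega)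
      have hdvd2 : ((n.toNat / n.toNat.minFac : Nat) : Int) ∣ n := by
        rw [← Int.toNat_of_nonneg (show (0:Int) ≤ n by omega), Int.natCast_dvd_natCast]
        exact Nat.div_dvd_of_dvd (Nat.minFac_dvd _)
      obtain ⟨n', fs, heq, ha, hb, hc2, hd2, he⟩ := divOutA_spec fuel i _ (acc ++ [i])
        hi (by exact_mod_cast hdivpos)
        (fun j hj hji hjd => hmin j hj hji (hjd.trans hdvd2)) (by omega)
      refine ⟨n', i :: fs, ?_, ha, ?_, hc2, hd2, ?_⟩
      · rw [hfd, heq]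
        simp
      · have hle : ((n.toNat / n.toNat.minFac : Nat) : Int) ≤ n := Int.le_of_dvd (by omega) hdvd2
        omega
      · rw [pfl_cons (show 2 ≤ n.toNat by omega)]
        rw [Int.toNat_natCast] at he
        simp [he, ← hmf]
    · have hc : (PySem.Int.mod n i == 0) = false := by simp [PySem.Int.mod_eq_zero_iff_dvd, hd]
      simp only [hc, Bool.false_eq_true, if_false]
      exact ⟨n, [], by simp, hn, le_refl n, hd, hmin, by simp⟩

lemma foldOdd_inv (num n1 : Int) :
    ∀ (t : Nat) (a : Int) (st : Int × List Int),
    3 ≤ a → a % 2 = 1 → 1 ≤ st.1 → st.1 ≤ n1 →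
    (∀ j : Int, 2 ≤ j → j < a → ¬ j ∣ st.1) →
    (num.toNat.primeFactorsList).map (fun k : Nat => (k : Int)) =
      st.2 ++ (st.1.toNat.primeFactorsList).map (fun k : Nat => (k : Int)) →
    ∃ st' : Int × List Int,
      ((List.range t).map (fun k : Nat => a + 2 * (k : Int))).foldl
        (fun (s : Int × List Int) i => divOutA (s.1.toNat + 1) i s.1 s.2) st = st' ∧
      1 ≤ st'.1 ∧ st'.1 ≤ n1 ∧
      (∀ j : Int, 2 ≤ j → j < a + 2 * t → ¬ j ∣ st'.1) ∧
      (num.toNat.primeFactorsList).map (fun k : Nat => (k : Int)) =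
        st'.2 ++ (st'.1.toNat.primeFactorsList).map (fun k : Nat => (k : Int))
  | 0, a, st, ha, hodd, h1, h2, hmin, hpf => by
    refine ⟨st, by simp, h1, h2, ?_, hpf⟩
    intro j hj hji
    exact hmin j hj (by push_cast at hji; omega)
  | t+1, a, st, ha, hodd, h1, h2, hmin, hpf => by
    rw [List.range_succ_eq_map, List.map_cons, List.map_map, List.foldl_cons]
    obtain ⟨n', fs, heq, ha', hb', hc', hd', he'⟩ := divOutA_spec (st.1.toNat + 1) a st.1 st.2
      (by omega) h1 (fun j hj hji => hmin j hj hji) (by omega)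
    have hstep : (fun k : Nat => a + 2 * (k : Int)) ∘ Nat.succ = fun k : Nat => (a + 2) + 2 * (k : Int) := by
      funext k
      simp only [Function.comp_apply]
      push_cast
      ring
    rw [hstep]
    simp only [Nat.cast_zero, mul_zero, add_zero]
    rw [heq]
    have hmin2 : ∀ j : Int, 2 ≤ j → j < a + 2 → ¬ j ∣ n' := by
      intro j hj hji hjd
      rcases lt_or_ge j a with h | h
      · exact hd' j hj h hjd
      · rcases eq_or_lt_of_le h with h' | h'
        · exact hc' (h' ▸ hjd)
        · have hja : j = a + 1 := by omega
          have h2d : (2 : Int) ∣ j := by omega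
          exact hd' 2 (by omega) (by omega) (h2d.trans hjd)
    obtain ⟨st', hfold, p1, p2, p3, p4⟩ := foldOdd_inv num n1 t (a + 2) (n', st.2 ++ fs)
      (by omega) (by omega) ha' (le_trans hb' h2) hmin2 (by rw [hpf, he']; simp)
    refine ⟨st', hfold, p1, p2, ?_, p4⟩
    intro j hj hji
    exact p3 j hj (by push_cast at hji ⊢; omega)

lemma factorsA_eq {n : Int} (hn : 2 ≤ n) :
    factorsA n = (n.toNat.primeFactorsList).map (fun k : Nat => (k : Int)) := by
  obtain ⟨n1, fs1, heq1, h1, hle1, hnd2, hmin1, hpf1⟩ := divOutA_spec (n.toNat + 1) 2 n []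
    (le_refl 2) (by omega) (fun j hj hji => absurd hji (by omega)) (by omega)
  simp only [List.nil_append] at heq1 hpf1
  simp only [factorsA, heq1]
  rw [PySem.List.pyRange_of_pos 3 (Int.sqrt n1 + 1) (show (0:Int) < 2 by norm_num)]
  set T := (if (3:Int) < Int.sqrt n1 + 1 then ((Int.sqrt n1 + 1 - 3 + 2 - 1) / 2).toNat else 0) with hT
  have hbound : Int.sqrt n1 < 3 + 2 * (T : Int) := by
    simp only [Int.sqrt] at hT ⊢
    rw [hT]
    split_ifs with h
    · omega
    · omega
  obtain ⟨st', hfold, p1, p2, p3, p4⟩ := foldOdd_inv n n1 T 3 (n1, fs1) (by norm_num) (by norm_num)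
    h1 (le_refl n1)
    (fun j hj hji => by
      have hj2 : j = 2 := by omega
      rw [hj2]
      exact hnd2) hpf1
  rw [hfold]
  have hT0 : (2:Int) < 3 + 2 * (T : Int) := by omega
  by_cases hgt : st'.1 > 2
  · simp only [hgt, if_true]
    have hpp : PP st'.1 := by
      refine prime_of_no_div (by omega) (fun j hj hjj hd => ?_)
      have hsq : j.toNat ≤ Nat.sqrt st'.1.toNat := by
        refine Nat.le_sqrt.2 ?_
        have : ((j.toNat * j.toNat : Nat) : Int) ≤ ((st'.1.toNat : Nat) : Int) := by
          push_cast
          rw [Int.toNat_of_nonneg (show (0:Int) ≤ j by omega), Int.toNat_of_nonneg (by omega)]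
          exact hjj
        exact_mod_cast this
      have hmono : Nat.sqrt st'.1.toNat ≤ Nat.sqrt n1.toNat := Nat.sqrt_le_sqrt (by omega)
      have hjb : j < 3 + 2 * (T : Int) := by
        simp only [Int.sqrt] at hbound
        omega
      exact p3 j hj hjb hd
    rw [Nat.primeFactorsList_prime hpp.2] at p4
    simp only [List.map_cons, List.map_nil] at p4
    rw [Int.toNat_of_nonneg (by omega)] at p4
    rw [p4]
  · simp only [hgt, if_false]
    have hne2 : st'.1 ≠ 2 := by
      intro h
      exact p3 2 (le_refl 2) hT0 (by rw [h])
    have h1' : st'.1.toNat = 1 := by omega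
    rw [h1'] at p4
    simpa using p4.symm

-- ===== VERDICT (by name: the statement is the Claim_ definition above) =====
theorem find_prime_info_spec : Claim_equal_find_prime_info := by
  intro num _
  simp only [Spec_find_prime_info, find_prime_info, find_prime_info_alt]
  by_cases h2 : num < 2
  · simp [h2]
  · simp only [h2, if_false]
    by_cases hp : PP num
    · simp [(isPrimeA_iff num).2 hp, (isPrimeB_iff num).2 hp]
    · have ha : isPrimeA num = false := by
        rw [← Bool.not_eq_true, isPrimeA_iff]
        exact hp
      have hb : isPrimeB num = false := by
        rw [← Bool.not_eq_true, isPrimeB_iff]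
        exact hp
      simp only [ha, hb, Bool.false_eq_true, if_false]
      obtain ⟨q1, b1, l1⟩ := exists_least_prime (show (1:Int) ≤ num by omega)
      have hq12 : 2 ≤ q1 := l1.2.1.1
      obtain ⟨q2, b2, l2⟩ := exists_least_prime (show (1:Int) ≤ q1 by omega)
      rw [nextPrimesA_two (by omega) l1 l2 b1 b2, nextPrimeB_eq (by omega) l1 b1,
        nextPrimeB_eq (by omega) l2 b2]
      rw [factorsA_eq (by omega), factBAux_eq (num.toNat + 1) num [] (by omega) (by omega)]
      simp
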